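-- pv_equiv track=rewrite | github.com/myanhon/ISCRIPT | src/Week_5/Cryptogrammen.py | checkCharOplossing
-- ===== SOURCE A (Python) =====
-- def checkCharOplossing(mogelijke_indexen, oplossing):
--     char = "?"
--     length = len(mogelijke_indexen)
--
--     i = 0
--     while(i < length):
--         index = mogelijke_indexen[i]
--         letter = oplossing[index]
--         if(not(letter == "?")):
--             char = letter
--         i += 1
--     return char
-- ===== SOURCE B (Python) =====
-- def checkCharOplossing(mogelijke_indexen, oplossing):
--     for index in reversed(mogelijke_indexen):
--         letter = oplossing[index]
--         if letter != "?":
--             return letter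
--     return "?"
-- ===== Notes on version B (the rewrite author's own statement) =====
-- stated objective: alternative
-- what changed: Replaces the forward scan-and-overwrite accumulator with a reverse search that returns the first non-'?' letter immediately (early exit).
import Mathlib
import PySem

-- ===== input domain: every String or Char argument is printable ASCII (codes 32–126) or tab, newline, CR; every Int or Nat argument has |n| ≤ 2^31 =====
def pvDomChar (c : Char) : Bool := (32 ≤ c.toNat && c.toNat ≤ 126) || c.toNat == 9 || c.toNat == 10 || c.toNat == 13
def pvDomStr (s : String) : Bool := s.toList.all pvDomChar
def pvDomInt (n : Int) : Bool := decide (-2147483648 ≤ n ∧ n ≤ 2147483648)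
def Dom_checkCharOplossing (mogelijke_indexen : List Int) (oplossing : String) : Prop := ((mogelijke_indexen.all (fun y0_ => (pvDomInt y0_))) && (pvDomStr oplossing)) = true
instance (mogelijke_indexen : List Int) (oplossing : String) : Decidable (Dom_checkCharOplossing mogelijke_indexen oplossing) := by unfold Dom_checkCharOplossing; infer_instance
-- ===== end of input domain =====

-- B replaces A's forward scan-and-overwrite accumulator with a reverse search returning the first non-'?' letter (early exit); same O(n) cost.

-- ===== PORT A =====
-- forward while-loop: keep overwriting char with each non-'?' letter seen
def checkCharOplossing (mogelijke_indexen : List Int) (oplossing : String) : String :=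
  mogelijke_indexen.foldl
    (fun ch index =>
      match PySem.Str.pyGet? oplossing index with
      | some letter => if ¬ (letter = '?') then String.ofList [letter] else ch
      | none => ch)   -- Python raises IndexError here; excluded by Pre_
    "?"

-- ===== PORT B =====
-- reverse search, early exit on the first non-'?' letter
def altGo (oplossing : String) : List Int → String
  | [] => "?"
  | index :: rest =>
    match PySem.Str.pyGet? oplossing index with
    | some letter => if letter ≠ '?' then String.ofList [letter] else altGo oplossing rest
    | none => altGo oplossing rest   -- Python raises IndexError here; excluded by Pre_

def checkCharOplossing_alt (mogelijke_indexen : List Int) (oplossing : String) : String :=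
  altGo oplossing mogelijke_indexen.reverse

-- ===== PRECONDITION & SPEC =====
-- Pre_: every index is a valid Python index into oplossing (A raises IndexError otherwise)
def Pre_checkCharOplossing (mogelijke_indexen : List Int) (oplossing : String) : Prop :=
  ∀ i ∈ mogelijke_indexen, PySem.Raise.InRange oplossing.toList.length i
instance (mogelijke_indexen : List Int) (oplossing : String) : Decidable (Pre_checkCharOplossing mogelijke_indexen oplossing) := by unfold Pre_checkCharOplossing; infer_instance
def pvWitness_checkCharOplossing : List Int × String := ([0, -1, 1], "a?c")

def Spec_checkCharOplossing (mogelijke_indexen : List Int) (oplossing : String) (out : String) : Prop := out = checkCharOplossing_alt mogelijke_indexen oplossing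
instance (mogelijke_indexen : List Int) (oplossing : String) (out : String) : Decidable (Spec_checkCharOplossing mogelijke_indexen oplossing out) := by unfold Spec_checkCharOplossing; infer_instance

-- ===== CLAIM (what is proved, stated in full; the proofs are below) =====
def Claim_equal_checkCharOplossing : Prop := ∀ (mogelijke_indexen : List Int) (oplossing : String), Dom_checkCharOplossing mogelijke_indexen oplossing → Pre_checkCharOplossing mogelijke_indexen oplossing → Spec_checkCharOplossing mogelijke_indexen oplossing (checkCharOplossing mogelijke_indexen oplossing)

-- ===== LEMMAS AND PROOFS =====

-- a found letter (≠ '?') never yields the string "?"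
lemma mk_ne_qmark {c : Char} (h : c ≠ '?') : String.ofList [c] ≠ "?" := by
  intro he
  apply h
  have := congrArg String.toList he
  rw [String.toList_ofList] at this
  simpa using this

-- key invariant: the foldl over l equals the reverse search's answer, falling back to ch
lemma foldl_eq_altGo (oplossing : String) (l : List Int) (ch : String)
    (hp : ∀ i ∈ l, PySem.Raise.InRange oplossing.toList.length i) :
    l.foldl
      (fun ch index =>
        match PySem.Str.pyGet? oplossing index with
        | some letter => if ¬ (letter = '?') then String.ofList [letter] else ch
        | none => ch) ch
    = (if altGo oplossing l.reverse = "?" then ch else altGo oplossing l.reverse) := by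
  induction l using List.reverseRecOn generalizing ch with
  | nil => simp [altGo]
  | append_singleton l' x ih =>
    have hx : PySem.Raise.InRange oplossing.toList.length x := hp x (by simp)
    have hx' : PySem.Str.pyGet? oplossing x ≠ none := by
      rw [show PySem.Str.pyGet? oplossing x = PySem.List.pyGet? oplossing.toList x from rfl]
      rw [Ne, PySem.List.pyGet?_eq_none_iff]
      simpa using hx
    obtain ⟨c, hc⟩ := Option.ne_none_iff_exists'.mp hx'
    rw [List.foldl_append, List.reverse_append]
    simp only [List.foldl_cons, List.foldl_nil, List.reverse_singleton, List.singleton_append,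
      altGo, hc]
    by_cases hq : c = '?'
    · subst hq
      simp only [ne_eq, not_true_eq_false, if_false]
      exact ih ch (fun i hi => hp i (by simp [hi]))
    · simp [hq, mk_ne_qmark hq]

-- ===== VERDICT (by name: the statement is the Claim_ definition above) =====
theorem checkCharOplossing_spec : Claim_equal_checkCharOplossing := by
  intro idx s _ hpre
  unfold Spec_checkCharOplossing checkCharOplossing checkCharOplossing_alt
  rw [foldl_eq_altGo s idx "?" hpre]
  split <;> simp_all
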